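-- pv_equiv track=rewrite | github.com/m13v/social-autoposter | scripts/linkedin_comment_fetch.py | pick_non_us_content
-- ===== SOURCE A (Python) =====
-- def _normalize(name):
--     return (name or "").lower().replace("premium profile you", "").replace("you", "").strip(" ·•").strip()
--
-- def _match_author(comment_author, target_author):
--     """Match comment author to target 'their_author' from notification.
--
--     LinkedIn renders authors as 'First Last Premium Profile You' or just 'First Last';
--     notifications may include extra text like ', MBA and 1 other'. Match on
--     prefix/substring after normalization.
--     """
--     c = _normalize(comment_author)
--     t = _normalize(target_author)
--     if not c or not t:
--         return False
--     # Trim target to the first author ("Scott Benson, MBA and 1 other" -> "Scott Benson")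
--     t_first = t.split(" and ")[0].split(",")[0].strip()
--     return t_first and (t_first in c or c in t_first)
--
-- def pick_non_us_content(comments, target_author=None, our_href_fragment="/in/m13v/"):
--     """Pick the best non-us comment body from a comment list.
--
--     Strategy:
--       1. Exclude any comment whose profile_href contains our_href_fragment.
--       2. If target_author given, prefer comments whose author matches.
--       3. Fall back to the first remaining comment with non-empty content.
--     Returns a string or None.
--     """
--     non_us = [
--         c for c in comments
--         if our_href_fragment not in (c.get("profile_href") or "").lower()
--     ]
--     if target_author:
--         for c in non_us:
--             if _match_author(c.get("author"), target_author) and c.get("content"):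
--                 return c["content"]
--     for c in non_us:
--         if c.get("content"):
--             return c["content"]
--     return None
-- ===== SOURCE B (Python) =====
-- def _normalize(name):
--     return (name or "").lower().replace("premium profile you", "").replace("you", "").strip(" ·•").strip()
--
-- def _match_author(comment_author, target_author):
--     c = _normalize(comment_author)
--     t = _normalize(target_author)
--     if not c or not t:
--         return False
--     t_first = t.split(" and ")[0].split(",")[0].strip()
--     return t_first and (t_first in c or c in t_first)
--
-- def pick_non_us_content(comments, target_author=None, our_href_fragment="/in/m13v/"):
--     """Single pass: skip our own comments, return the first author-matched
--     content immediately, otherwise remember the first non-empty content as a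
--     fallback and return it after the scan."""
--     fallback = None
--     for c in comments:
--         if our_href_fragment in (c.get("profile_href") or "").lower():
--             continue
--         content = c.get("content")
--         if target_author and _match_author(c.get("author"), target_author) and content:
--             return content
--         if fallback is None and content:
--             fallback = content
--     return fallback
-- ===== Notes on version B (the rewrite author's own statement) =====
-- stated objective: simpler
-- what changed: Replaced A's filtered intermediate list plus two sequential scans with one pass over comments that returns an author-matched content immediately and otherwise remembers the first non-empty content as a fallback returned after the scan.
import Mathlib
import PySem

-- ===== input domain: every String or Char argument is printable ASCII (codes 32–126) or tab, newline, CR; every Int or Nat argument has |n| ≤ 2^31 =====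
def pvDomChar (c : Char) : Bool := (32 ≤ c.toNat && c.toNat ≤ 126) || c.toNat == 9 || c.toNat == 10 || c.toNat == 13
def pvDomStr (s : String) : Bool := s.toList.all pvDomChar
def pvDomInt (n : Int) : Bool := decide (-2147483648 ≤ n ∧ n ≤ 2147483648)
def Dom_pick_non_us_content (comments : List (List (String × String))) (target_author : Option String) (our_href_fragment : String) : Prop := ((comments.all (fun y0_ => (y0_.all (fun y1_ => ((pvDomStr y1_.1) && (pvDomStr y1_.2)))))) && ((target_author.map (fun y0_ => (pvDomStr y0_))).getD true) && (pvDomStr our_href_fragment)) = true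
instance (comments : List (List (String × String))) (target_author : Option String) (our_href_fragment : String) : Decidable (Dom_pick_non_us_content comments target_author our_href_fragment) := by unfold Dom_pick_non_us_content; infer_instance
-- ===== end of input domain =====

-- B replaces A's filtered list plus two scans by a single pass carrying a fallback; simpler decomposition, same result.


-- shared helpers (same-module helpers of A, kept unchanged by B)

-- (name or "").lower().replace(...).replace(...).strip(" ·•").strip()
def pvNormalize (name : Option String) : String :=
  PySem.Str.strip (PySem.Str.stripChars
    (PySem.Str.replace (PySem.Str.replace (PySem.Str.lower (name.getD "")) "premium profile you" "") "you" "")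
    " ·•")

def pvMatchAuthor (comment_author : Option String) (target_author : String) : Bool :=
  let c := pvNormalize comment_author
  let t := pvNormalize (some target_author)
  if c == "" || t == "" then false
  else
    let t_first := PySem.Str.strip ((((PySem.Str.split? ((((PySem.Str.split? t " and ").getD []).headD "")) ",").getD []).headD ""))
    !(t_first == "") && (PySem.Str.isIn t_first c || PySem.Str.isIn c t_first)

-- Python truthiness of an Optional[str]
def pvTruthy (o : Option String) : Bool := match o with | none => false | some s => !(s == "")

-- our_href_fragment in (c.get("profile_href") or "").lower()
def pvIsUs (frag : String) (c : List (String × String)) : Bool :=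
  PySem.Str.isIn frag (PySem.Str.lower ((c.lookup "profile_href").getD ""))

-- ===== PORT A =====
def pvLoop1 (t : String) : List (List (String × String)) → Option String
  | [] => none
  | c :: rest =>
    if pvMatchAuthor (c.lookup "author") t && pvTruthy (c.lookup "content") then c.lookup "content"
    else pvLoop1 t rest

def pvLoop2 : List (List (String × String)) → Option String
  | [] => none
  | c :: rest => if pvTruthy (c.lookup "content") then c.lookup "content" else pvLoop2 rest

def pick_non_us_content (comments : List (List (String × String))) (target_author : Option String) (our_href_fragment : String) : Option String :=
  let non_us := comments.filter (fun c => !(pvIsUs our_href_fragment c))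
  let first := if pvTruthy target_author then pvLoop1 (target_author.getD "") non_us else none
  match first with
  | some s => some s
  | none => pvLoop2 non_us

-- ===== PORT B =====
def pvGo (ta : Option String) (frag : String) : List (List (String × String)) → Option String → Option String
  | [], fb => fb
  | c :: rest, fb =>
    if pvIsUs frag c then pvGo ta frag rest fb
    else if pvTruthy ta && pvMatchAuthor (c.lookup "author") (ta.getD "") && pvTruthy (c.lookup "content") then
      c.lookup "content"
    else if fb.isNone && pvTruthy (c.lookup "content") then pvGo ta frag rest (c.lookup "content")
    else pvGo ta frag rest fb

def pick_non_us_content_alt (comments : List (List (String × String))) (target_author : Option String) (our_href_fragment : String) : Option String :=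
  pvGo target_author our_href_fragment comments none

-- ===== PRECONDITION & SPEC =====
def Spec_pick_non_us_content (comments : List (List (String × String))) (target_author : Option String) (our_href_fragment : String) (out : Option String) : Prop := out = pick_non_us_content_alt comments target_author our_href_fragment
instance (comments : List (List (String × String))) (target_author : Option String) (our_href_fragment : String) (out : Option String) : Decidable (Spec_pick_non_us_content comments target_author our_href_fragment out) := by unfold Spec_pick_non_us_content; infer_instance

-- ===== CLAIM (what is proved, stated in full; the proofs are below) =====
def Claim_equal_pick_non_us_content : Prop := ∀ (comments : List (List (String × String))) (target_author : Option String) (our_href_fragment : String), Dom_pick_non_us_content comments target_author our_href_fragment → Spec_pick_non_us_content comments target_author our_href_fragment (pick_non_us_content comments target_author our_href_fragment)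

-- ===== LEMMAS AND PROOFS =====

-- B's single pass equals A's shape on the filtered list, for any pending fallback fb
theorem pvGo_eq (ta : Option String) (frag : String) (l : List (List (String × String))) (fb : Option String) :
    pvGo ta frag l fb =
      match (if pvTruthy ta then pvLoop1 (ta.getD "") (l.filter (fun c => !(pvIsUs frag c))) else none) with
      | some s => some s
      | none => match fb with
                | some x => some x
                | none => pvLoop2 (l.filter (fun c => !(pvIsUs frag c))) := by
  induction l generalizing fb with
  | nil =>
    cases fb <;> simp [pvGo, pvLoop1, pvLoop2]
  | cons c rest ih =>
    by_cases hus : pvIsUs frag c = true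
    · simp [pvGo, hus, ih fb]
    · have hfc : (c :: rest).filter (fun c => !(pvIsUs frag c)) = c :: rest.filter (fun c => !(pvIsUs frag c)) := by
        simp [hus]
      by_cases hct : pvTruthy (List.lookup "content" c) = true
      · obtain ⟨s, hs⟩ : ∃ s, List.lookup "content" c = some s := by
          cases h : List.lookup "content" c with
          | none => rw [h] at hct; simp [pvTruthy] at hct
          | some s => exact ⟨s, rfl⟩
        rw [hs] at hct
        by_cases hta : pvTruthy ta = true
        · by_cases hmm : pvMatchAuthor (List.lookup "author" c) (ta.getD "") = true
          · simp [pvGo, hus, hta, hmm, hs, hct, hfc, pvLoop1]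
          · cases fb with
            | none => simp [pvGo, hus, hta, hmm, hs, hct, hfc, pvLoop1, pvLoop2, ih (some s)]
            | some x => simp [pvGo, hus, hta, hmm, hs, hct, hfc, pvLoop1, ih (some x)]
        · cases fb with
          | none => simp [pvGo, hus, hta, hs, hct, hfc, pvLoop2, ih (some s)]
          | some x => simp [pvGo, hus, hta, hs, hct, ih (some x)]
      · simp [pvGo, hus, hct, hfc, pvLoop1, pvLoop2, ih fb]

-- ===== VERDICT (by name: the statement is the Claim_ definition above) =====
theorem pick_non_us_content_spec : Claim_equal_pick_non_us_content := by
  intro comments ta frag _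
  unfold Spec_pick_non_us_content pick_non_us_content pick_non_us_content_alt
  rw [pvGo_eq]
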